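-- pv_equiv track=rewrite | github.com/eternality8/TinkerBell | src/tinkerbell/editor/patches.py | _sequence_occurs_multiple_times
-- ===== SOURCE A (Python) =====
-- from typing import List, Optional, Sequence, Tuple
--
-- def _sequence_occurs_multiple_times(lines: Sequence[str], needle: Sequence[str]) -> bool:
--     if not needle:
--         return False
--     segment = list(needle)
--     if not segment:
--         return False
--     limit = len(lines) - len(segment) + 1
--     if limit <= 0:
--         return False
--     matches = 0
--     for index in range(0, limit + 1):
--         if lines[index : index + len(segment)] == segment:
--             matches += 1
--             if matches >= 2:
--                 return True
--     return False
-- ===== SOURCE B (Python) =====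
-- def _sequence_occurs_multiple_times(lines, needle):
--     needle = list(needle)
--     if not needle:
--         return False
--     suffix = list(lines)
--     found = False
--     while len(suffix) >= len(needle):
--         if suffix[: len(needle)] == needle:
--             if found:
--                 return True
--             found = True
--         suffix = suffix[1:]
--     return False
-- ===== Notes on version B (the rewrite author's own statement) =====
-- stated objective: simpler
-- what changed: Replaces A's index-arithmetic loop (explicit limit computation with a dead extra iteration and an integer match counter) by a plain scan over the suffixes of lines, testing whether needle is a prefix of the current suffix and remembering a first hit with a boolean flag.
import Mathlib
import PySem

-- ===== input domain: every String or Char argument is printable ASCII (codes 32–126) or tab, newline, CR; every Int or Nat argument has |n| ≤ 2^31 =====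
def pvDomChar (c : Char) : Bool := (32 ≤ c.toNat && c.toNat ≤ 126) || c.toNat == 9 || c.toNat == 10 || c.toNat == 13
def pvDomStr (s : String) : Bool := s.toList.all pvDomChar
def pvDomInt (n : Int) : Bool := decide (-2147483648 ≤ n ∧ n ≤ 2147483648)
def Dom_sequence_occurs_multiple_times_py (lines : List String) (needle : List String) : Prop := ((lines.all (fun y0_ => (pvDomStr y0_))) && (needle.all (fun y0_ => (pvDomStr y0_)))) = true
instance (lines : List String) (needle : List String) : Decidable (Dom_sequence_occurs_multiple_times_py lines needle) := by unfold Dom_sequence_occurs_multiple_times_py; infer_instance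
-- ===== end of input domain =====

-- B replaces A's index-arithmetic loop (limit computation, dead extra iteration, int match
-- counter) with a plain scan over the suffixes of `lines`, testing needle as a prefix and
-- remembering a first hit with a boolean flag (objective: simpler; same return value).

-- ===== PORT A =====
-- 'for index in range(0, limit + 1): …' with the 'mcount' counter and early return
def seqMatchLoop (lines segment : List String) : List Int → Int → Bool
  | [], _ => false
  | index :: rest, mcount =>
    if PySem.List.slice lines (some index) (some (index + (segment.length : Int))) = segment then
      if mcount + 1 ≥ 2 then true
      else seqMatchLoop lines segment rest (mcount + 1)
    else seqMatchLoop lines segment rest mcount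

def sequence_occurs_multiple_times_py (lines : List String) (needle : List String) : Bool :=
  if needle.isEmpty then false
  else
    let segment := needle
    if segment.isEmpty then false
    else
      let limit : Int := (lines.length : Int) - (segment.length : Int) + 1
      if limit ≤ 0 then false
      else seqMatchLoop lines segment (PySem.List.pyRange 0 (limit + 1) 1) 0

-- ===== PORT B =====
-- 'while len(suffix) >= len(needle): …' with suffix = suffix[1:] each round
def seqAltLoop (needle : List String) : List String → Bool → Bool
  | [], _ => false
  | s :: rest, found =>
    if needle.length ≤ (s :: rest).length then
      if PySem.List.slice (s :: rest) none (some (needle.length : Int)) = needle then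
        if found then true
        else seqAltLoop needle rest true
      else seqAltLoop needle rest found
    else false

def sequence_occurs_multiple_times_py_alt (lines : List String) (needle : List String) : Bool :=
  if needle.isEmpty then false
  else seqAltLoop needle lines false

-- ===== PRECONDITION & SPEC =====
def Spec_sequence_occurs_multiple_times_py (lines : List String) (needle : List String) (out : Bool) : Prop := out = sequence_occurs_multiple_times_py_alt lines needle
instance (lines : List String) (needle : List String) (out : Bool) : Decidable (Spec_sequence_occurs_multiple_times_py lines needle out) := by unfold Spec_sequence_occurs_multiple_times_py; infer_instance

-- ===== CLAIM (what is proved, stated in full; the proofs are below) =====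
def Claim_equal_sequence_occurs_multiple_times_py : Prop := ∀ (lines : List String) (needle : List String), Dom_sequence_occurs_multiple_times_py lines needle → Spec_sequence_occurs_multiple_times_py lines needle (sequence_occurs_multiple_times_py lines needle)

-- ===== LEMMAS AND PROOFS =====

-- A's loop returns false when no remaining index can match.
lemma seqMatchLoop_false (lines needle : List String) :
    ∀ (r : List Int) (mcount : Int),
      (∀ idx ∈ r, PySem.List.slice lines (some idx) (some (idx + (needle.length : Int))) ≠ needle) →
      seqMatchLoop lines needle r mcount = false := by
  intro r
  induction r with
  | nil => intro mcount _; rfl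
  | cons idx rest ih =>
    intro mcount h
    simp only [seqMatchLoop]
    rw [if_neg (h idx (by simp))]
    exact ih mcount (fun j hj => h j (by simp [hj]))

-- a slice starting at idx ≥ n - m + 1 is shorter than m, hence never equals needle
lemma slice_short_ne (lines needle : List String) (idx : Int)
    (hm : needle ≠ []) (h0 : 0 ≤ idx)
    (hi : (lines.length : Int) - needle.length < idx) :
    PySem.List.slice lines (some idx) (some (idx + (needle.length : Int))) ≠ needle := by
  intro hEq
  have hlen := congrArg List.length hEq
  rw [PySem.List.slice_toNat lines h0 (by omega)] at hlen
  simp [List.length_take, List.length_drop] at hlen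
  have hm1 : 1 ≤ needle.length := by
    cases needle with
    | nil => exact absurd rfl hm
    | cons a t => simp
  omega

-- main loop correspondence: A's loop from index i equals B's loop on lines.drop i
lemma loop_eq (lines needle : List String) (hm : needle ≠ [])
    (hn : needle.length ≤ lines.length) :
    ∀ (suffix : List String) (i : Nat), lines.drop i = suffix →
      ∀ mcount : Int, mcount = 0 ∨ mcount = 1 →
      seqMatchLoop lines needle
        (PySem.List.pyRange (i : Int) ((lines.length : Int) - (needle.length : Int) + 1 + 1) 1)
        mcount
      = seqAltLoop needle suffix (mcount == 1) := by
  intro suffix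
  induction suffix with
  | nil =>
    intro i hdrop mcount _
    have hi : lines.length ≤ i := by
      have := congrArg List.length hdrop
      simp [List.length_drop] at this
      omega
    rw [seqMatchLoop_false]
    · rfl
    · intro idx hidx
      rw [PySem.List.mem_pyRange_one] at hidx
      exact slice_short_ne lines needle idx hm (by omega)
        (by
          have hm1 : 1 ≤ needle.length := by
            cases needle with
            | nil => exact absurd rfl hm
            | cons a t => simp
          omega)
  | cons s rest ih =>
    intro i hdrop mcount hmat
    have hlen : lines.length - i = rest.length + 1 := by
      have := congrArg List.length hdrop
      simpa [List.length_drop] using this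
    have hi : i < lines.length := by omega
    have hrest : lines.drop (i + 1) = rest := by
      have : lines.drop (i + 1) = (lines.drop i).drop 1 := by
        rw [List.drop_drop]
      rw [this, hdrop]
      rfl
    by_cases hfit : needle.length ≤ lines.length - i
    · -- window fits: both compare the same prefix
      have hcons : PySem.List.pyRange (i : Int)
          ((lines.length : Int) - (needle.length : Int) + 1 + 1) 1
          = (i : Int) :: PySem.List.pyRange ((i : Int) + 1)
              ((lines.length : Int) - (needle.length : Int) + 1 + 1) 1 := by
        exact PySem.List.pyRange_one_cons (by omega)
      rw [hcons]
      simp only [seqMatchLoop, seqAltLoop]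
      have hsliceA : PySem.List.slice lines (some (i : Int))
          (some ((i : Int) + (needle.length : Int))) = (lines.drop i).take needle.length := by
        exact PySem.List.slice_natCast_add lines i needle.length
      have hsliceB : PySem.List.slice (s :: rest) none (some ((needle.length : Nat) : Int))
          = (s :: rest).take needle.length := by
        exact PySem.List.slice_to_natCast (s :: rest) needle.length
      rw [hsliceA, hdrop, hsliceB]
      have hfit' : needle.length ≤ (s :: rest).length := by
        simp only [List.length_cons]
        omega
      rw [if_pos hfit']
      have ecast : ((i : Int) + 1) = (((i + 1 : Nat) : Int)) := by push_cast; ring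
      by_cases hmatch : (s :: rest).take needle.length = needle
      · rw [if_pos hmatch, if_pos hmatch]
        rcases hmat with h0 | h1
        · subst h0
          have e1 : ¬ ((0 : Int) + 1 ≥ 2) := by omega
          rw [if_neg e1, ecast, show (0 : Int) + 1 = 1 from by norm_num, ih (i + 1) hrest 1 (Or.inr rfl)]
          simp
        · subst h1
          have e1 : ((1 : Int) + 1 ≥ 2) := by omega
          rw [if_pos e1]
          simp
      · rw [if_neg hmatch, if_neg hmatch, ecast]
        exact ih (i + 1) hrest mcount hmat
    · -- window no longer fits: B stops; A's remaining slices are all too short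
      simp only [seqAltLoop]
      have hfit' : ¬ (needle.length ≤ (s :: rest).length) := by
        simp only [List.length_cons]
        omega
      rw [if_neg hfit']
      rw [seqMatchLoop_false]
      intro idx hidx
      rw [PySem.List.mem_pyRange_one] at hidx
      exact slice_short_ne lines needle idx hm (by omega) (by omega)

-- ===== VERDICT (by name: the statement is the Claim_ definition above) =====
theorem sequence_occurs_multiple_times_py_spec : Claim_equal_sequence_occurs_multiple_times_py := by
  intro lines needle _
  unfold Spec_sequence_occurs_multiple_times_py
  unfold sequence_occurs_multiple_times_py sequence_occurs_multiple_times_py_alt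
  by_cases hne : needle.isEmpty
  · simp [hne]
  · simp only [hne]
    have hm : needle ≠ [] := by
      cases needle with
      | nil => simp at hne
      | cons a t => simp
    have hm1 : 1 ≤ needle.length := by
      cases needle with
      | nil => exact absurd rfl hm
      | cons a t => simp
    by_cases hlim : (lines.length : Int) - (needle.length : Int) + 1 ≤ 0
    · rw [if_pos hlim]
      cases lines with
      | nil => rfl
      | cons s rest =>
        simp only [seqAltLoop]
        have hlt : ¬ (needle.length ≤ (s :: rest).length) := by
          simp only [List.length_cons] at hlim ⊢
          omega
        rw [if_neg hlt]
        simp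
    · rw [if_neg hlim]
      have hn : needle.length ≤ lines.length := by omega
      have := loop_eq lines needle hm hn lines 0 (by simp) 0 (Or.inl rfl)
      simpa using this
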